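-- pv_equiv track=rewrite | github.com/mauryavivekMPS/prod_code_clone | misc/snippets/reset_published_article_type.py | generate_match_pattern
-- ===== SOURCE A (Python) =====
-- def generate_match_pattern(example_doi):
--     pattern = ''
--     num_non_alphas = 0
--
--     def _non_alpha_re(n):
--         return '[^a-z]' + ('{%s}' % n if n > 1 else '')
--
--     for c in example_doi:
--         if c.isalpha():
--             if num_non_alphas:
--                 pattern += _non_alpha_re(num_non_alphas)
--                 num_non_alphas = 0
--             pattern += c
--         else:
--             num_non_alphas += 1
--
--     if num_non_alphas:
--         pattern += _non_alpha_re(num_non_alphas)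
--
--     return '^' + pattern + '$'
-- ===== SOURCE B (Python) =====
-- def generate_match_pattern(example_doi):
--     parts = []
--     i, n = 0, len(example_doi)
--     while i < n:
--         alpha = example_doi[i].isalpha()
--         j = i
--         while j < n and example_doi[j].isalpha() == alpha:
--             j += 1
--         if alpha:
--             parts.append(example_doi[i:j])
--         else:
--             run = j - i
--             parts.append('[^a-z]' + ('{%s}' % run if run > 1 else ''))
--         i = j
--     return '^' + ''.join(parts) + '$'
-- ===== Notes on version B (the rewrite author's own statement) =====
-- stated objective: idiomatic
-- what changed: B scans the string as maximal runs of alpha/non-alpha characters (two-level run scan emitting one regex fragment per run) instead of A's char-by-char loop with a pending non-alpha counter and flush-on-alpha logic.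
import Mathlib
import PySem

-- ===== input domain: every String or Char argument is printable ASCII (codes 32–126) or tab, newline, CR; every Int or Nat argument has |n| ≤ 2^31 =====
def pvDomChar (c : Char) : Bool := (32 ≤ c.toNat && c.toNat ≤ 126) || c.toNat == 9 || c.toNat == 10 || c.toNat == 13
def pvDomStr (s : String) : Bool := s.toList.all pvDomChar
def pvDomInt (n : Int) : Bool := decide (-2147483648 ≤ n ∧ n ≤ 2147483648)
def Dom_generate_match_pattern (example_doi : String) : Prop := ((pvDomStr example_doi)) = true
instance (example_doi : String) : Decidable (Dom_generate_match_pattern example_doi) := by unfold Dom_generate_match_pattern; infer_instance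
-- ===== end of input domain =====

-- B replaces A's char-by-char loop with a pending non-alpha counter by a scan over
-- maximal runs of alpha/non-alpha characters, emitting one regex fragment per run
-- (objective: idiomatic; same asymptotic cost).

-- ===== PORT A =====
-- '[^a-z]' + ('{%s}' % n if n > 1 else '')
def pvNonAlphaRe (n : Nat) : List Char :=
  ['[', '^', 'a', '-', 'z', ']'] ++ (if n > 1 then '{' :: (PySem.Int.toChars (n : Int) ++ ['}']) else [])

-- one iteration of A's for-loop over (pattern, num_non_alphas)
def pvStepA (st : List Char × Nat) (c : Char) : List Char × Nat :=
  if PySem.Chars.isalpha c then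
    ((if st.2 ≠ 0 then st.1 ++ pvNonAlphaRe st.2 else st.1) ++ [c], 0)
  else
    (st.1, st.2 + 1)

def generate_match_pattern (example_doi : String) : String :=
  let st := example_doi.toList.foldl pvStepA ([], 0)
  let pattern := if st.2 ≠ 0 then st.1 ++ pvNonAlphaRe st.2 else st.1
  String.ofList ('^' :: pattern ++ ['$'])

-- ===== PORT B =====
-- the fragment B emits for a non-alpha run of length len
def pvSegNA (len : Nat) : List Char :=
  ['[', '^', 'a', '-', 'z', ']'] ++ (if len > 1 then '{' :: (PySem.Int.toChars (len : Int) ++ ['}']) else [])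

-- B's outer while-loop: split into maximal runs of equal isalpha-ness
def pvRuns : List Char → List (Bool × List Char)
  | [] => []
  | c :: cs =>
    (PySem.Chars.isalpha c,
      c :: cs.takeWhile (fun d => PySem.Chars.isalpha d == PySem.Chars.isalpha c)) ::
      pvRuns (cs.dropWhile (fun d => PySem.Chars.isalpha d == PySem.Chars.isalpha c))
termination_by cs => cs.length
decreasing_by simpa using Nat.lt_succ_of_le (List.length_dropWhile_le _ _)

-- the fragment appended for one run
def pvSeg : Bool × List Char → List Char
  | (true, g) => g
  | (false, g) => pvSegNA g.length

def generate_match_pattern_alt (example_doi : String) : String :=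
  String.ofList ('^' :: ((pvRuns example_doi.toList).map pvSeg).flatten ++ ['$'])

-- ===== PRECONDITION & SPEC =====
def Spec_generate_match_pattern (example_doi : String) (out : String) : Prop := out = generate_match_pattern_alt example_doi
instance (example_doi : String) (out : String) : Decidable (Spec_generate_match_pattern example_doi out) := by unfold Spec_generate_match_pattern; infer_instance

-- ===== CLAIM (what is proved, stated in full; the proofs are below) =====
def Claim_equal_generate_match_pattern : Prop := ∀ (example_doi : String), Dom_generate_match_pattern example_doi → Spec_generate_match_pattern example_doi (generate_match_pattern example_doi)

-- ===== LEMMAS AND PROOFS =====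

-- A's loop, rephrased as a tail recursion over the remaining characters with the
-- pending counter n (proof-side characterisation of A's result).
def pvPend : Nat → List Char → List Char
  | n, [] => if n ≠ 0 then pvNonAlphaRe n else []
  | n, c :: cs =>
    if PySem.Chars.isalpha c then
      (if n ≠ 0 then pvNonAlphaRe n else []) ++ c :: pvPend 0 cs
    else
      pvPend (n + 1) cs

-- right-recursive grouping (value-equal to pvRuns, easier to induct on)
def pvGrp : List Char → List (Bool × List Char)
  | [] => []
  | c :: cs =>
    match pvGrp cs with
    | [] => [(PySem.Chars.isalpha c, [c])]
    | (k, g) :: rest =>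
      if PySem.Chars.isalpha c == k then (k, c :: g) :: rest
      else (PySem.Chars.isalpha c, [c]) :: (k, g) :: rest

-- what pvPend n renders given the grouped tail
def pvRender (n : Nat) (rs : List (Bool × List Char)) : List Char :=
  match rs with
  | (false, g) :: rest => pvNonAlphaRe (n + g.length) ++ (rest.map pvSeg).flatten
  | rs => (if n ≠ 0 then pvNonAlphaRe n else []) ++ (rs.map pvSeg).flatten

theorem pvFoldA (cs : List Char) : ∀ (p : List Char) (n : Nat),
    (let st := cs.foldl pvStepA (p, n);
     if st.2 ≠ 0 then st.1 ++ pvNonAlphaRe st.2 else st.1) = p ++ pvPend n cs := by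
  induction cs with
  | nil => intro p n; simp [pvPend]; split <;> simp
  | cons c cs ih =>
    intro p n
    simp only [List.foldl_cons, pvPend, pvStepA]
    by_cases h : PySem.Chars.isalpha c = true
    · simp only [h, if_pos]
      rw [ih]
      by_cases hn : n = 0 <;> simp [hn]
    · simp only [h]
      rw [ih]
      simp

theorem pvL (cs : List Char) : ∀ n, pvPend n cs = pvRender n (pvGrp cs) := by
  induction cs with
  | nil => intro n; simp [pvPend, pvGrp, pvRender]
  | cons c cs ih =>
    intro n
    by_cases h : PySem.Chars.isalpha c = true
    · have h0 : pvPend 0 cs = ((pvGrp cs).map pvSeg).flatten := by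
        rw [ih 0]
        cases hg : pvGrp cs with
        | nil => simp [pvRender]
        | cons r rest =>
          rcases r with ⟨k, g⟩
          cases k <;> simp [pvRender, pvSeg, pvSegNA, pvNonAlphaRe]
      simp only [pvPend, h, if_pos]
      cases hg : pvGrp cs with
      | nil => simp [pvGrp, hg, h, pvRender, pvSeg, h0]
      | cons r rest =>
        rcases r with ⟨k, g⟩
        cases k with
        | false =>
          simp [pvGrp, hg, h, pvRender, pvSeg, h0]
        | true =>
          simp [pvGrp, hg, h, pvRender, pvSeg, h0]
    · have h' : PySem.Chars.isalpha c = false := by simpa using h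
      simp only [pvPend, h']
      rw [ih (n + 1)]
      cases hg : pvGrp cs with
      | nil => simp [pvGrp, hg, h', pvRender]
      | cons r rest =>
        rcases r with ⟨k, g⟩
        cases k with
        | false =>
          simp only [pvGrp, hg, h']
          simp [pvRender]
          ring_nf
        | true =>
          simp only [pvGrp, hg, h']
          by_cases hn : n + 1 ≠ 0
          · simp [pvRender]
          · omega

theorem pvRuns_eq_grp (cs : List Char) : pvRuns cs = pvGrp cs := by
  induction hL : cs.length using Nat.strong_induction_on generalizing cs with
  | _ N ih =>
    cases cs with
    | nil => simp [pvRuns, pvGrp]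
    | cons c cs =>
      rw [pvRuns]
      -- right side: show pvGrp (c :: cs) has the same head-run/tail shape
      have key : ∀ (ds : List Char) (c : Char),
          pvGrp (c :: ds) =
            (PySem.Chars.isalpha c,
              c :: ds.takeWhile (fun d => PySem.Chars.isalpha d == PySem.Chars.isalpha c)) ::
            pvGrp (ds.dropWhile (fun d => PySem.Chars.isalpha d == PySem.Chars.isalpha c)) := by
        intro ds
        induction ds with
        | nil => intro c; simp [pvGrp]
        | cons d ds ihd =>
          intro c
          by_cases hcd : PySem.Chars.isalpha d = PySem.Chars.isalpha c
          · have : pvGrp (c :: d :: ds) =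
                match pvGrp (d :: ds) with
                | [] => [(PySem.Chars.isalpha c, [c])]
                | (k, g) :: rest =>
                  if PySem.Chars.isalpha c == k then (k, c :: g) :: rest
                  else (PySem.Chars.isalpha c, [c]) :: (k, g) :: rest := rfl
            rw [this, ihd d]
            simp [List.takeWhile, List.dropWhile, hcd]
          · have : pvGrp (c :: d :: ds) =
                match pvGrp (d :: ds) with
                | [] => [(PySem.Chars.isalpha c, [c])]
                | (k, g) :: rest =>
                  if PySem.Chars.isalpha c == k then (k, c :: g) :: rest
                  else (PySem.Chars.isalpha c, [c]) :: (k, g) :: rest := rfl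
            rw [this, ihd d]
            have hne : (PySem.Chars.isalpha d == PySem.Chars.isalpha c) = false := by
              simpa using hcd
            have hne' : (PySem.Chars.isalpha c == PySem.Chars.isalpha d) = false := by
              simp; intro h; exact hcd h.symm
            simp [List.takeWhile, List.dropWhile, hne, hne', ihd d]
      rw [key cs c]
      congr 1
      have hlt : (cs.dropWhile
          (fun d => PySem.Chars.isalpha d == PySem.Chars.isalpha c)).length < N := by
        subst hL
        exact Nat.lt_succ_of_le (List.length_dropWhile_le _ _)
      exact ih _ hlt _ rfl

-- ===== VERDICT (by name: the statement is the Claim_ definition above) =====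
theorem generate_match_pattern_spec : Claim_equal_generate_match_pattern := by
  intro s _
  unfold Spec_generate_match_pattern generate_match_pattern generate_match_pattern_alt
  rw [pvRuns_eq_grp]
  have h := pvFoldA s.toList [] 0
  simp only [List.nil_append] at h
  simp only [h, pvL s.toList 0]
  cases hg : pvGrp s.toList with
  | nil => simp [pvRender]
  | cons r rest =>
    rcases r with ⟨k, g⟩
    cases k <;> simp [pvRender, pvSeg, pvSegNA, pvNonAlphaRe]
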